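-- pv_equiv track=rewrite | github.com/qc-tum/fermi_hubbard_commutators | fh_comm/commutator.py | _support_region
-- ===== SOURCE A (Python) =====
-- from collections.abc import Sequence
--
-- def _support_region(supp: Sequence[tuple]):
--     """
--     Enclosing rectangular region enclosing the provided support points,
--     ignoring the spin degree of freedom.
--     """
--     if not supp:
--         return (), ()
--     # support without spin
--     cmin = list(supp[0][:-1])
--     cmax = list(supp[0][:-1])
--     for s in supp:
--         for i in range(len(cmin)):
--             if cmin[i] > s[i]:
--                 cmin[i] = s[i]
--             elif cmax[i] < s[i]:
--                 cmax[i] = s[i]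
--     return tuple(cmin), tuple(cmax)
-- ===== SOURCE B (Python) =====
-- def _support_region(supp):
--     """
--     Enclosing rectangular region enclosing the provided support points,
--     ignoring the spin degree of freedom.
--     """
--     if not supp:
--         return (), ()
--     d = len(supp[0]) - 1
--     cmin = tuple(min(s[i] for s in supp) for i in range(d))
--     cmax = tuple(max(s[i] for s in supp) for i in range(d))
--     return cmin, cmax
-- ===== Notes on version B (the rewrite author's own statement) =====
-- stated objective: idiomatic
-- what changed: Replaces A's single point-by-point pass mutating running cmin/cmax arrays with an index-guarded elif by per-coordinate reductions using built-in min/max (one pass over the points per coordinate).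
import Mathlib
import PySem

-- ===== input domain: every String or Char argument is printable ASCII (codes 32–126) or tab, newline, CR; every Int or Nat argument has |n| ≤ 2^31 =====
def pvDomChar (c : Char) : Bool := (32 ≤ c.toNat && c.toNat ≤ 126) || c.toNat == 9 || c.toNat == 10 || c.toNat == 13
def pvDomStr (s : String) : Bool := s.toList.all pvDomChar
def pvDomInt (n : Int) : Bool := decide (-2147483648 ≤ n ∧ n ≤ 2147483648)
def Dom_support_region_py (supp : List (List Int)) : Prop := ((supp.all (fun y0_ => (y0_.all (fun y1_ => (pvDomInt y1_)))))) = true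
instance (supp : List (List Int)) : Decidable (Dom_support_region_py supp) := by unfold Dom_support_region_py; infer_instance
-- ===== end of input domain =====

-- B replaces A's single mutating pass over the points by per-coordinate min/max reductions (idiomatic; same cost).

-- ===== PORT A =====
-- one inner-loop iteration of A: `if cmin[i] > s[i]: cmin[i] = s[i]  elif cmax[i] < s[i]: cmax[i] = s[i]`
-- (on Pre_ every index i is in range for s, so List.getD _ _ 0 / List.set are exact for Python's s[i] and cmin[i] = v)

def pvInnerStep (s : List Int) (st : List Int × List Int) (i : Nat) : List Int × List Int :=
  let v := s.getD i 0
  if st.1.getD i 0 > v then (st.1.set i v, st.2)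
  else if st.2.getD i 0 < v then (st.1, st.2.set i v)
  else st


def support_region_py (supp : List (List Int)) : List Int × List Int :=
  match supp with
  | [] => ([], [])
  | s0 :: _ =>
    let c0 := s0.dropLast   -- supp[0][:-1]
    supp.foldl (fun st s => (List.range c0.length).foldl (pvInnerStep s) st) (c0, c0)

-- ===== PORT B =====
def support_region_py_alt (supp : List (List Int)) : List Int × List Int :=
  match supp with
  | [] => ([], [])
  | s0 :: rest =>
    let d := s0.length - 1
    ((List.range d).map (fun i => rest.foldl (fun m s => min m (s.getD i 0)) (s0.getD i 0)),
     (List.range d).map (fun i => rest.foldl (fun m s => max m (s.getD i 0)) (s0.getD i 0)))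

-- ===== PRECONDITION & SPEC =====
-- Pre_ excludes exactly the ragged inputs on which Python A raises IndexError
-- (some point shorter than len(supp[0]) - 1); Python B raises IndexError there too.
def Pre_support_region_py (supp : List (List Int)) : Prop :=
  ∀ s ∈ supp, (supp.headD []).length - 1 ≤ s.length
instance (supp : List (List Int)) : Decidable (Pre_support_region_py supp) := by
  unfold Pre_support_region_py; infer_instance
def pvWitness_support_region_py : List (List Int) := [[1, 2, 7], [0, 5, 3]]

def Spec_support_region_py (supp : List (List Int)) (out : List Int × List Int) : Prop := out = support_region_py_alt supp
instance (supp : List (List Int)) (out : List Int × List Int) : Decidable (Spec_support_region_py supp out) := by unfold Spec_support_region_py; infer_instance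

-- ===== CLAIM (what is proved, stated in full; the proofs are below) =====
def Claim_equal_support_region_py : Prop := ∀ (supp : List (List Int)), Dom_support_region_py supp → Pre_support_region_py supp → Spec_support_region_py supp (support_region_py supp)

-- ===== LEMMAS AND PROOFS =====

theorem getD_set_self (l : List Int) (v : Int) (n : Nat) (h : n < l.length) :
    (l.set n v).getD n 0 = v := by
  simp [List.getD, h]

theorem getD_set_ne (l : List Int) (v : Int) (n i : Nat) (h : i ≠ n) :
    (l.set n v).getD i 0 = l.getD i 0 := by
  simp [List.getD, (Ne.symm h)]

theorem pvStep_spec (s : List Int) (r : List Int × List Int) (n : Nat)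
    (hn1 : n < r.1.length) (hn2 : n < r.2.length)
    (hinv : r.1.getD n 0 ≤ r.2.getD n 0) :
    (pvInnerStep s r n).1.length = r.1.length ∧
    (pvInnerStep s r n).2.length = r.2.length ∧
    (pvInnerStep s r n).1.getD n 0 = min (r.1.getD n 0) (s.getD n 0) ∧
    (pvInnerStep s r n).2.getD n 0 = max (r.2.getD n 0) (s.getD n 0) ∧
    (∀ i, i ≠ n → (pvInnerStep s r n).1.getD i 0 = r.1.getD i 0 ∧
                  (pvInnerStep s r n).2.getD i 0 = r.2.getD i 0) := by
  unfold pvInnerStep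
  by_cases h1 : r.1.getD n 0 > s.getD n 0
  · rw [if_pos h1]
    refine ⟨by simp, rfl, ?_, ?_, ?_⟩
    · rw [getD_set_self _ _ _ hn1, min_eq_right (le_of_lt h1)]
    · rw [max_eq_left (le_trans (le_of_lt h1) hinv)]
    · intro i hi; exact ⟨getD_set_ne _ _ _ _ hi, rfl⟩
  · rw [if_neg h1]
    by_cases h2 : r.2.getD n 0 < s.getD n 0
    · rw [if_pos h2]
      refine ⟨rfl, by simp, ?_, ?_, ?_⟩
      · rw [min_eq_left (not_lt.mp h1)]
      · rw [getD_set_self _ _ _ hn2, max_eq_right (le_of_lt h2)]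
      · intro i hi; exact ⟨rfl, getD_set_ne _ _ _ _ hi⟩
    · rw [if_neg h2]
      exact ⟨rfl, rfl, by rw [min_eq_left (not_lt.mp h1)],
             by rw [max_eq_left (not_lt.mp h2)], fun i _ => ⟨rfl, rfl⟩⟩

theorem pvInner_spec (s cmin cmax : List Int) (n : Nat)
    (hc : n ≤ cmin.length) (hd : n ≤ cmax.length)
    (hinv : ∀ i, cmin.getD i 0 ≤ cmax.getD i 0) :
    ((List.range n).foldl (pvInnerStep s) (cmin, cmax)).1.length = cmin.length ∧
    ((List.range n).foldl (pvInnerStep s) (cmin, cmax)).2.length = cmax.length ∧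
    (∀ i, ((List.range n).foldl (pvInnerStep s) (cmin, cmax)).1.getD i 0 =
        if i < n then min (cmin.getD i 0) (s.getD i 0) else cmin.getD i 0) ∧
    (∀ i, ((List.range n).foldl (pvInnerStep s) (cmin, cmax)).2.getD i 0 =
        if i < n then max (cmax.getD i 0) (s.getD i 0) else cmax.getD i 0) := by
  induction n with
  | zero => exact ⟨rfl, rfl, by simp, by simp⟩
  | succ n ih =>
    obtain ⟨h1, h2, h3, h4⟩ := ih (Nat.le_of_succ_le hc) (Nat.le_of_succ_le hd)
    have hfold : (List.range (n+1)).foldl (pvInnerStep s) (cmin, cmax)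
        = pvInnerStep s ((List.range n).foldl (pvInnerStep s) (cmin, cmax)) n := by
      rw [List.range_succ, List.foldl_append, List.foldl_cons, List.foldl_nil]
    set r := (List.range n).foldl (pvInnerStep s) (cmin, cmax) with hr
    have hrn1 : r.1.getD n 0 = cmin.getD n 0 := by rw [h3]; simp
    have hrn2 : r.2.getD n 0 = cmax.getD n 0 := by rw [h4]; simp
    have hn1 : n < r.1.length := by omega
    have hn2 : n < r.2.length := by omega
    have hinvn : r.1.getD n 0 ≤ r.2.getD n 0 := by rw [hrn1, hrn2]; exact hinv n
    obtain ⟨g1, g2, g3, g4, g5⟩ := pvStep_spec s r n hn1 hn2 hinvn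
    rw [hfold]
    refine ⟨g1.trans h1, g2.trans h2, ?_, ?_⟩
    · intro i
      by_cases hi : i = n
      · subst hi
        rw [g3, hrn1, if_pos (Nat.lt_succ_self _)]
      · rw [(g5 i hi).1, h3]
        by_cases h : i < n
        · rw [if_pos h, if_pos (Nat.lt_succ_of_lt h)]
        · rw [if_neg h, if_neg (by omega)]
    · intro i
      by_cases hi : i = n
      · subst hi
        rw [g4, hrn2, if_pos (Nat.lt_succ_self _)]
      · rw [(g5 i hi).2, h4]
        by_cases h : i < n
        · rw [if_pos h, if_pos (Nat.lt_succ_of_lt h)]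
        · rw [if_neg h, if_neg (by omega)]

theorem pvOuter_spec (l : List (List Int)) (cmin cmax : List Int) (n : Nat)
    (hc : cmin.length = n) (hd : cmax.length = n)
    (hinv : ∀ i, cmin.getD i 0 ≤ cmax.getD i 0) :
    (l.foldl (fun st s => (List.range n).foldl (pvInnerStep s) st) (cmin, cmax)).1.length = n ∧
    (l.foldl (fun st s => (List.range n).foldl (pvInnerStep s) st) (cmin, cmax)).2.length = n ∧
    ∀ i < n,
      (l.foldl (fun st s => (List.range n).foldl (pvInnerStep s) st) (cmin, cmax)).1.getD i 0
        = l.foldl (fun m s => min m (s.getD i 0)) (cmin.getD i 0) ∧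
      (l.foldl (fun st s => (List.range n).foldl (pvInnerStep s) st) (cmin, cmax)).2.getD i 0
        = l.foldl (fun m s => max m (s.getD i 0)) (cmax.getD i 0) := by
  induction l generalizing cmin cmax with
  | nil => exact ⟨hc, hd, fun i _ => ⟨rfl, rfl⟩⟩
  | cons s rest ih =>
    obtain ⟨h1, h2, h3, h4⟩ := pvInner_spec s cmin cmax n (le_of_eq hc.symm) (le_of_eq hd.symm) hinv
    set r1 := (List.range n).foldl (pvInnerStep s) (cmin, cmax) with hr1
    have hinv' : ∀ i, r1.1.getD i 0 ≤ r1.2.getD i 0 := by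
      intro i; rw [h3, h4]
      by_cases h : i < n
      · rw [if_pos h, if_pos h]
        exact min_le_of_left_le (le_trans (hinv i) (le_max_left _ _))
      · rw [if_neg h, if_neg h]; exact hinv i
    obtain ⟨g1, g2, g3⟩ := ih r1.1 r1.2 (h1.trans hc) (h2.trans hd) hinv'
    have hfold : ((s :: rest).foldl (fun st s => (List.range n).foldl (pvInnerStep s) st) (cmin, cmax))
        = rest.foldl (fun st s => (List.range n).foldl (pvInnerStep s) st) (r1.1, r1.2) := by
      rw [List.foldl_cons]
    rw [hfold]
    refine ⟨g1, g2, ?_⟩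
    intro i hi
    obtain ⟨e1, e2⟩ := g3 i hi
    rw [List.foldl_cons, List.foldl_cons]
    exact ⟨by rw [e1, h3, if_pos hi], by rw [e2, h4, if_pos hi]⟩

-- dropLast agrees with the original list on indices below length - 1
theorem pvDropLast_getD (s : List Int) (i : Nat) (hi : i < s.length - 1) :
    s.dropLast.getD i 0 = s.getD i 0 := by
  have h1 : i < s.dropLast.length := by simp; omega
  have h2 : i < s.length := by omega
  rw [List.getD_eq_getElem _ _ h1, List.getD_eq_getElem _ _ h2, List.getElem_dropLast]

theorem pv_main (supp : List (List Int)) :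
    support_region_py supp = support_region_py_alt supp := by
  match supp with
  | [] => rfl
  | s0 :: rest =>
    unfold support_region_py support_region_py_alt
    simp only []
    set c0 := s0.dropLast with hc0
    have hd : c0.length = s0.length - 1 := by simp [hc0]
    obtain ⟨g1, g2, g3⟩ := pvOuter_spec (s0 :: rest) c0 c0 c0.length rfl rfl (fun i => le_refl _)
    set r := (s0 :: rest).foldl
        (fun st s => (List.range c0.length).foldl (pvInnerStep s) st) (c0, c0) with hr
    have e1 : r.1 = (List.range (s0.length - 1)).map
        (fun i => rest.foldl (fun m s => min m (s.getD i 0)) (s0.getD i 0)) := by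
      apply List.ext_getElem
      · simpa [g1] using hd
      · intro i hi1 hi2
        have hin : i < c0.length := by omega
        have hic : i < s0.length - 1 := by simpa using hi2
        obtain ⟨f1, _⟩ := g3 i hin
        rw [← List.getD_eq_getElem _ 0 hi1, f1]
        simp only [List.foldl_cons, List.getElem_map, List.getElem_range]
        rw [pvDropLast_getD s0 i hic, min_self]
    have e2 : r.2 = (List.range (s0.length - 1)).map
        (fun i => rest.foldl (fun m s => max m (s.getD i 0)) (s0.getD i 0)) := by
      apply List.ext_getElem
      · simpa [g2] using hd
      · intro i hi1 hi2
        have hin : i < c0.length := by omega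
        have hic : i < s0.length - 1 := by simpa using hi2
        obtain ⟨_, f2⟩ := g3 i hin
        rw [← List.getD_eq_getElem _ 0 hi1, f2]
        simp only [List.foldl_cons, List.getElem_map, List.getElem_range]
        rw [pvDropLast_getD s0 i hic, max_self]
    exact Prod.ext e1 e2

-- ===== VERDICT (by name: the statement is the Claim_ definition above) =====
theorem support_region_py_spec : Claim_equal_support_region_py := by
  intro supp _ _
  unfold Spec_support_region_py
  exact pv_main supp
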